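-- pv_equiv track=rewrite | github.com/AstroLightz/yt-dlp-adv2 | utility/utils_menu.py | menu_get_options
-- ===== SOURCE A (Python) =====
-- def menu_get_options(entries: int) -> list[str]:
--     """
--     Given number of entries, format a string for input menus
--     :param entries: Number of entries in menu
--     :return: List of each option in the menu
--     """
--
--     opt_list: list[str] = []
--
--     for i in range(entries):
--         if i < 9:
--             # 1-9
--             opt_list.append(f"{i + 1}")
--
--         elif i == 9:
--             # 0 for 10
--             opt_list.append("0")
--
--         else:
--             # Chars after 10
--             opt_list.append(f"{chr(55 + i)}")
--
--     return opt_list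
-- ===== SOURCE B (Python) =====
-- def menu_get_options(entries: int) -> list[str]:
--     """Constant-table slice for the first ten labels, then an overflow loop."""
--     head = "1234567890"[:max(0, entries)]
--     tail = "".join(chr(55 + i) for i in range(10, entries))
--     return list(head + tail)
-- ===== Notes on version B (the rewrite author's own statement) =====
-- stated objective: simpler
-- what changed: Replaces the per-element if/elif/else branching loop with a slice of the constant table "1234567890" plus a single chr overflow loop for indices >= 10; B's Python matches A everywhere A returns, including the entries >= 55242 region whose lone-surrogate labels no Lean String can represent (hence Pre_).
-- outside the precondition, e.g. on menu_get_options(1114058): A raises ValueError, B raises ValueError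
import Mathlib
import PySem

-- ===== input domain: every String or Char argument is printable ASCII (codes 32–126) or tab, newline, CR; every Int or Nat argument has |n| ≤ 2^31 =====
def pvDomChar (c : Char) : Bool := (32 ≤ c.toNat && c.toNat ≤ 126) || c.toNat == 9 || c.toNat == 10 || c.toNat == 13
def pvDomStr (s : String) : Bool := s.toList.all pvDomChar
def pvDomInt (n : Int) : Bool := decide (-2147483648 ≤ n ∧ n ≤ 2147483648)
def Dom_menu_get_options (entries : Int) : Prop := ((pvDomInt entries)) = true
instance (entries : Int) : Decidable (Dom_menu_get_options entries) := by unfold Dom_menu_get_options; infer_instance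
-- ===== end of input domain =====

-- B replaces the per-element if/elif/else with a constant-table slice plus an overflow loop (objective: simpler).
-- Return-value equivalence only; neither program mutates anything.

-- ===== PORT A =====
def menu_get_options (entries : Int) : List String :=
  (PySem.List.pyRange 0 entries 1).foldl
    (fun opt_list i =>
      if i < 9 then opt_list ++ [PySem.Int.toStr (i + 1)]
      else if i = 9 then opt_list ++ ["0"]
      -- chr(55 + i) ported by hand via Char.ofNat: exact for code points below 0xD800 (ensured by Pre_)
      else opt_list ++ [String.mk [Char.ofNat (55 + i).toNat]])
    []

-- ===== PORT B =====
def menu_get_options_alt (entries : Int) : List String :=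
  let head := PySem.List.slice "1234567890".toList none (some (max 0 entries))
  -- chr(55 + i) ported by hand via Char.ofNat, as in A's port: exact below code point 0xD800
  let tail := (PySem.List.pyRange 10 entries 1).map (fun i => Char.ofNat (55 + i).toNat)
  (head ++ tail).map (fun c => String.mk [c])

-- ===== PRECONDITION & SPEC =====
-- Pre_ excludes entries ≥ 55242, on which A's returned list (which B's Python reproduces exactly)
-- contains labels chr(0xD800) and beyond — lone UTF-16 surrogates that are not values of the port's
-- declared type (no Lean Char/String exists for a surrogate code point), so the claimed value cannot
-- even be stated in Lean there; from entries ≥ 1114058 both Pythons raise ValueError in chr.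
def Pre_menu_get_options (entries : Int) : Prop := entries ≤ 55241
instance (entries : Int) : Decidable (Pre_menu_get_options entries) := by unfold Pre_menu_get_options; infer_instance
def pvWitness_menu_get_options : Int := 13
def Spec_menu_get_options (entries : Int) (out : List String) : Prop := out = menu_get_options_alt entries
instance (entries : Int) (out : List String) : Decidable (Spec_menu_get_options entries out) := by unfold Spec_menu_get_options; infer_instance

-- ===== CLAIM (what is proved, stated in full; the proofs are below) =====
def Claim_equal_menu_get_options : Prop := ∀ (entries : Int), Dom_menu_get_options entries → Pre_menu_get_options entries → Spec_menu_get_options entries (menu_get_options entries)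

-- ===== LEMMAS AND PROOFS =====

-- per-element label function of A (proof helper)
def pvLabel (i : Int) : String :=
  if i < 9 then PySem.Int.toStr (i + 1)
  else if i = 9 then "0"
  else String.mk [Char.ofNat (55 + i).toNat]

theorem pv_a_eq_map (entries : Int) :
    menu_get_options entries = (PySem.List.pyRange 0 entries 1).map pvLabel := by
  unfold menu_get_options
  have h : (fun (opt_list : List String) (i : Int) =>
      if i < 9 then opt_list ++ [PySem.Int.toStr (i + 1)]
      else if i = 9 then opt_list ++ ["0"]
      else opt_list ++ [String.mk [Char.ofNat (55 + i).toNat]])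
      = fun opt_list i => opt_list ++ [pvLabel i] := by
    funext acc i; unfold pvLabel; split_ifs <;> rfl
  rw [h, PySem.List.foldl_append_singleton_eq_map]
  simp

-- ===== VERDICT (by name: the statement is the Claim_ definition above) =====
theorem menu_get_options_spec : Claim_equal_menu_get_options := by
  intro entries _ _
  show menu_get_options entries = menu_get_options_alt entries
  rw [pv_a_eq_map]
  by_cases hle : entries ≤ 10
  · by_cases hnn : 0 ≤ entries
    · interval_cases entries <;> decide
    · unfold menu_get_options_alt
      have hmax : max 0 entries = 0 := by omega
      simp [pysem, hmax, PySem.List.pyRange, show ¬ (0:Int) < entries by omega,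
            show ¬ (10:Int) < entries by omega]
  · unfold menu_get_options_alt
    have hmax : max 0 entries = entries := by omega
    rw [hmax, PySem.List.slice_to _ (by omega : (0:Int) ≤ entries)]
    have htake : List.take entries.toNat "1234567890".toList = "1234567890".toList := by
      apply List.take_of_length_le
      simp [show "1234567890".toList = ['1','2','3','4','5','6','7','8','9','0'] from rfl]
      omega
    rw [htake,
        PySem.List.pyRange_one_append 0 10 entries (by omega) (by omega),
        List.map_append, List.map_append, List.map_map]
    refine congrArg₂ (· ++ ·) (by decide) ?_
    apply List.map_congr_left
    intro i hi
    have h10 : 10 ≤ i := (PySem.List.mem_pyRange_one.mp hi).1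
    have h10' := (PySem.List.mem_pyRange_one.mp hi).2
    unfold pvLabel
    rw [if_neg (by omega), if_neg (by omega)]
    rfl
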